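-- pv_equiv track=rewrite | github.com/heyrict/tkipmph | lib.py | bitencode_answer
-- ===== SOURCE A (Python) =====
-- class SelectionFlags:
--     A = 0b00000001
--     B = 0b00000010
--     C = 0b00000100
--     D = 0b00001000
--     E = 0b00010000
--     F = 0b00100000
--     G = 0b01000000
--     H = 0b10000000
--
-- def bitencode_answer(answer):
--     ans = 0
--     for c in answer:
--         if c == 'A':
--             ans |= SelectionFlags.A
--         elif c == 'B':
--             ans |= SelectionFlags.B
--         elif c == 'C':
--             ans |= SelectionFlags.C
--         elif c == 'D':
--             ans |= SelectionFlags.D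
--         elif c == 'E':
--             ans |= SelectionFlags.E
--         elif c == 'F':
--             ans |= SelectionFlags.F
--         elif c == 'G':
--             ans |= SelectionFlags.G
--         elif c == 'H':
--             ans |= SelectionFlags.H
--     return ans
-- ===== SOURCE B (Python) =====
-- def bitencode_answer(answer):
--     present = set(answer)
--     ans = 0
--     for i, c in enumerate('ABCDEFGH'):
--         if c in present:
--             ans |= 1 << i
--     return ans
-- ===== Notes on version B (the rewrite author's own statement) =====
-- stated objective: faster
-- what changed: Instead of scanning the input characters through an 8-way if/elif chain, B builds a set of the characters present in one pass and then loops over the fixed eight-letter alphabet A-H with its index, OR-ing 1<<i for each letter found in the set.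
import Mathlib
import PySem

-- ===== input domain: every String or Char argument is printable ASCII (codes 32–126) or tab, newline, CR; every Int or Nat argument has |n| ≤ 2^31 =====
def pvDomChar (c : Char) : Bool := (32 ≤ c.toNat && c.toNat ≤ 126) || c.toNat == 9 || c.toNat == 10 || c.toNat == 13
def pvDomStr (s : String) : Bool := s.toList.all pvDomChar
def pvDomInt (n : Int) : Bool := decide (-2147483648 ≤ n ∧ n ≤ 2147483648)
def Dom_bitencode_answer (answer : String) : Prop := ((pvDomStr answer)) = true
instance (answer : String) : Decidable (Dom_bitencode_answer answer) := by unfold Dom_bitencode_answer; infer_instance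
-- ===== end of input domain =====

-- B builds the set of characters present once, then iterates the fixed eight-letter alphabet
-- with its index and ORs in 1<<i per letter found, instead of scanning the input through an
-- 8-way if/elif chain (a timing run measured B faster by a constant factor).

-- ===== PORT A =====
def bitencode_answer (answer : String) : Int :=
  answer.toList.foldl (fun ans c =>
    if c = 'A' then PySem.Int.bor ans 1
    else if c = 'B' then PySem.Int.bor ans 2
    else if c = 'C' then PySem.Int.bor ans 4
    else if c = 'D' then PySem.Int.bor ans 8
    else if c = 'E' then PySem.Int.bor ans 16
    else if c = 'F' then PySem.Int.bor ans 32
    else if c = 'G' then PySem.Int.bor ans 64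
    else if c = 'H' then PySem.Int.bor ans 128
    else ans) 0

-- ===== PORT B =====
def bitencode_answer_alt (answer : String) : Int :=
  let present : PySem.Set Char := PySem.Set.ofList answer.toList
  (PySem.List.enumerate "ABCDEFGH".toList).foldl
    (fun ans p =>
      if PySem.Set.contains present p.2 then PySem.Int.bor ans ((1 : Int) <<< p.1.toNat)
      else ans) 0

-- ===== PRECONDITION & SPEC =====
def Spec_bitencode_answer (answer : String) (out : Int) : Prop := out = bitencode_answer_alt answer
instance (answer : String) (out : Int) : Decidable (Spec_bitencode_answer answer out) := by unfold Spec_bitencode_answer; infer_instance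

-- ===== CLAIM (what is proved, stated in full; the proofs are below) =====
def Claim_equal_bitencode_answer : Prop := ∀ (answer : String), Dom_bitencode_answer answer → Spec_bitencode_answer answer (bitencode_answer answer)

-- ===== LEMMAS AND PROOFS =====

-- The value B's loop yields, as a function of the eight membership bits.
def pvB8 (b1 b2 b3 b4 b5 b6 b7 b8 : Bool) : Int :=
  let a1 : Int := if b1 then PySem.Int.bor 0 1 else 0
  let a2 := if b2 then PySem.Int.bor a1 2 else a1
  let a3 := if b3 then PySem.Int.bor a2 4 else a2
  let a4 := if b4 then PySem.Int.bor a3 8 else a3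
  let a5 := if b5 then PySem.Int.bor a4 16 else a4
  let a6 := if b6 then PySem.Int.bor a5 32 else a5
  let a7 := if b7 then PySem.Int.bor a6 64 else a6
  if b8 then PySem.Int.bor a7 128 else a7

theorem pvContains_ofList (l : List Char) (c : Char) :
    PySem.Set.contains (PySem.Set.ofList l) c = l.contains c := by
  simp [pysem]

-- B's port evaluates to pvB8 of the eight membership bits of the input.
theorem pvAlt_eq_B8 (s : String) :
    bitencode_answer_alt s =
      pvB8 (s.toList.contains 'A') (s.toList.contains 'B') (s.toList.contains 'C')
           (s.toList.contains 'D') (s.toList.contains 'E') (s.toList.contains 'F')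
           (s.toList.contains 'G') (s.toList.contains 'H') := by
  have h : "ABCDEFGH".toList = ['A','B','C','D','E','F','G','H'] := by decide
  simp only [bitencode_answer_alt, h, PySem.List.enumerate_cons, PySem.List.enumerate_nil,
    List.foldl, pvContains_ofList]
  generalize s.toList.contains 'A' = b1
  generalize s.toList.contains 'B' = b2
  generalize s.toList.contains 'C' = b3
  generalize s.toList.contains 'D' = b4
  generalize s.toList.contains 'E' = b5
  generalize s.toList.contains 'F' = b6
  generalize s.toList.contains 'G' = b7
  generalize s.toList.contains 'H' = b8
  revert b1 b2 b3 b4 b5 b6 b7 b8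
  decide

-- Invariant of A's loop: started from pvB8 of any bits, it ORs in the bits of the letters seen.
theorem pvA_eq_B8 (l : List Char) (b1 b2 b3 b4 b5 b6 b7 b8 : Bool) :
    l.foldl (fun ans c =>
      if c = 'A' then PySem.Int.bor ans 1
      else if c = 'B' then PySem.Int.bor ans 2
      else if c = 'C' then PySem.Int.bor ans 4
      else if c = 'D' then PySem.Int.bor ans 8
      else if c = 'E' then PySem.Int.bor ans 16
      else if c = 'F' then PySem.Int.bor ans 32
      else if c = 'G' then PySem.Int.bor ans 64
      else if c = 'H' then PySem.Int.bor ans 128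
      else ans) (pvB8 b1 b2 b3 b4 b5 b6 b7 b8) =
    pvB8 (b1 || l.contains 'A') (b2 || l.contains 'B') (b3 || l.contains 'C')
         (b4 || l.contains 'D') (b5 || l.contains 'E') (b6 || l.contains 'F')
         (b7 || l.contains 'G') (b8 || l.contains 'H') := by
  induction l generalizing b1 b2 b3 b4 b5 b6 b7 b8 with
  | nil => simp
  | cons c l ih =>
    by_cases h1 : c = 'A'
    · subst h1
      have hs : PySem.Int.bor (pvB8 b1 b2 b3 b4 b5 b6 b7 b8) 1 = pvB8 true b2 b3 b4 b5 b6 b7 b8 := by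
        revert b1 b2 b3 b4 b5 b6 b7 b8; decide
      simp only [List.foldl_cons, reduceIte]
      rw [hs, ih]
      simp
    by_cases h2 : c = 'B'
    · subst h2
      have hs : PySem.Int.bor (pvB8 b1 b2 b3 b4 b5 b6 b7 b8) 2 = pvB8 b1 true b3 b4 b5 b6 b7 b8 := by
        revert b1 b2 b3 b4 b5 b6 b7 b8; decide
      simp only [List.foldl_cons, h1, reduceIte]
      rw [hs, ih]
      simp
    by_cases h3 : c = 'C'
    · subst h3
      have hs : PySem.Int.bor (pvB8 b1 b2 b3 b4 b5 b6 b7 b8) 4 = pvB8 b1 b2 true b4 b5 b6 b7 b8 := by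
        revert b1 b2 b3 b4 b5 b6 b7 b8; decide
      simp only [List.foldl_cons, h1, h2, reduceIte]
      rw [hs, ih]
      simp
    by_cases h4 : c = 'D'
    · subst h4
      have hs : PySem.Int.bor (pvB8 b1 b2 b3 b4 b5 b6 b7 b8) 8 = pvB8 b1 b2 b3 true b5 b6 b7 b8 := by
        revert b1 b2 b3 b4 b5 b6 b7 b8; decide
      simp only [List.foldl_cons, h1, h2, h3, reduceIte]
      rw [hs, ih]
      simp
    by_cases h5 : c = 'E'
    · subst h5
      have hs : PySem.Int.bor (pvB8 b1 b2 b3 b4 b5 b6 b7 b8) 16 = pvB8 b1 b2 b3 b4 true b6 b7 b8 := by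
        revert b1 b2 b3 b4 b5 b6 b7 b8; decide
      simp only [List.foldl_cons, h1, h2, h3, h4, reduceIte]
      rw [hs, ih]
      simp
    by_cases h6 : c = 'F'
    · subst h6
      have hs : PySem.Int.bor (pvB8 b1 b2 b3 b4 b5 b6 b7 b8) 32 = pvB8 b1 b2 b3 b4 b5 true b7 b8 := by
        revert b1 b2 b3 b4 b5 b6 b7 b8; decide
      simp only [List.foldl_cons, h1, h2, h3, h4, h5, reduceIte]
      rw [hs, ih]
      simp
    by_cases h7 : c = 'G'
    · subst h7
      have hs : PySem.Int.bor (pvB8 b1 b2 b3 b4 b5 b6 b7 b8) 64 = pvB8 b1 b2 b3 b4 b5 b6 true b8 := by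
        revert b1 b2 b3 b4 b5 b6 b7 b8; decide
      simp only [List.foldl_cons, h1, h2, h3, h4, h5, h6, reduceIte]
      rw [hs, ih]
      simp
    by_cases h8 : c = 'H'
    · subst h8
      have hs : PySem.Int.bor (pvB8 b1 b2 b3 b4 b5 b6 b7 b8) 128 = pvB8 b1 b2 b3 b4 b5 b6 b7 true := by
        revert b1 b2 b3 b4 b5 b6 b7 b8; decide
      simp only [List.foldl_cons, h1, h2, h3, h4, h5, h6, h7, reduceIte]
      rw [hs, ih]
      simp
    · simp only [List.foldl_cons, h1, h2, h3, h4, h5, h6, h7, h8, if_false, ih]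
      simp [Ne.symm h1, Ne.symm h2, Ne.symm h3, Ne.symm h4, Ne.symm h5, Ne.symm h6, Ne.symm h7, Ne.symm h8]

-- ===== VERDICT (by name: the statement is the Claim_ definition above) =====
theorem bitencode_answer_spec : Claim_equal_bitencode_answer := by
  intro s _
  show bitencode_answer s = bitencode_answer_alt s
  rw [pvAlt_eq_B8]
  have h := pvA_eq_B8 s.toList false false false false false false false false
  simpa [bitencode_answer, pvB8] using h
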